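-- pv_equiv track=rewrite | github.com/Ikerlb/aoc2015 | 3/sol.py | part2
-- ===== SOURCE A (Python) =====
-- def step(r, c, op):
--     if op == ">":
--         dr, dc = 1, 0
--     elif op == "<":
--         dr, dc = -1, 0
--     elif op == "^":
--         dr, dc = 0, 1
--     else:
--         dr, dc = 0, -1
--     return r + dr, c + dc
--
-- def part2(instructions):
--     dirs = [[0, 0], [0, 0]]
--     s = {(0, 0)}
--
--     for i in range(len(instructions)):
--         santa = i % 2
--         r, c = step(*dirs[santa], instructions[i])
--         dirs[santa][0] = r
--         dirs[santa][1] = c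
--         s.add((r, c))
--
--     return len(s)
-- ===== SOURCE B (Python) =====
-- def part2(instructions):
--     DIRS = {">": (1, 0), "<": (-1, 0), "^": (0, 1)}
--
--     def trail(ops):
--         r = c = 0
--         out = []
--         for op in ops:
--             dr, dc = DIRS.get(op, (0, -1))
--             r, c = r + dr, c + dc
--             out.append((r, c))
--         return out
--
--     return len({(0, 0), *trail(instructions[0::2]), *trail(instructions[1::2])})
-- ===== Notes on version B (the rewrite author's own statement) =====
-- stated objective: alternative
-- what changed: Instead of A's single interleaved loop that tracks both santas with santa = i % 2 indexing into a mutable pair and grows the set as it goes, B splits the instructions up front into the two parity slices instructions[0::2] and instructions[1::2], walks each santa independently in its own staged pass collecting its trail of positions, and deduplicates the two trails plus the origin with one set construction at the end.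
import Mathlib
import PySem

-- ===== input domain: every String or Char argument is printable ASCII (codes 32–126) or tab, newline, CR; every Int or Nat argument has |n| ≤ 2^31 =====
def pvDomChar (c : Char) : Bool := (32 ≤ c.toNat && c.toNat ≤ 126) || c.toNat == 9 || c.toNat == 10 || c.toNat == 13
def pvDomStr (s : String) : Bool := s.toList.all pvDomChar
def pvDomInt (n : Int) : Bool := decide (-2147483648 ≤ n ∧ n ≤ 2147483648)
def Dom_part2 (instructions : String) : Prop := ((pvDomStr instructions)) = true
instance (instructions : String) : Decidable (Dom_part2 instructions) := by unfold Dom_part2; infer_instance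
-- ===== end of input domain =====

-- B replaces A's single interleaved loop (santa = i % 2 indexing into a mutable pair,
-- set grown during the loop) by staged passes: split the string into the parity slices
-- instructions[0::2] / instructions[1::2], walk each santa independently collecting its
-- trail, deduplicate trails + origin once at the end.  Objective: alternative; same O(n).

-- ===== PORT A =====
def stepA (r c : Int) (op : Char) : Int × Int :=
  let dd : Int × Int :=
    if op = '>' then (1, 0)
    else if op = '<' then (-1, 0)
    else if op = '^' then (0, 1)
    else (0, -1)
  (r + dd.1, c + dd.2)

-- A's loop body: st = ((dirs[0], dirs[1]), s), i the loop index, op = instructions[i]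
def bodyA (st : ((Int × Int) × (Int × Int)) × PySem.Set (Int × Int)) (i : Int) (op : Char) :
    ((Int × Int) × (Int × Int)) × PySem.Set (Int × Int) :=
  let santa := PySem.Int.mod i 2
  let d := if santa = 0 then st.1.1 else st.1.2
  let rc := stepA d.1 d.2 op
  (if santa = 0 then (rc, st.1.2) else (st.1.1, rc), PySem.Set.add st.2 rc)

def part2 (instructions : String) : Int :=
  let cs := instructions.toList
  let st := (PySem.List.pyRange 0 (PySem.List.len cs) 1).foldl
    (fun st i => bodyA st i (PySem.List.pyGetD cs i ' '))
    (((0, 0), (0, 0)), PySem.Set.ofList [(0, 0)])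
  PySem.Set.len st.2

-- ===== PORT B =====
def dirsB : PySem.Dict Char (Int × Int) :=
  (((PySem.Dict.empty).insert '>' (1, 0)).insert '<' (-1, 0)).insert '^' (0, 1)

-- one step of B's trail loop: DIRS.get(op, (0, -1)) and move
def moveB (p : Int × Int) (op : Char) : Int × Int :=
  let d := PySem.Dict.getD dirsB op (0, -1)
  (p.1 + d.1, p.2 + d.2)

-- B's trail(ops): loop over ops keeping the running position, appending each position
def trailB (p : Int × Int) : List Char → List (Int × Int)
  | [] => []
  | op :: t =>
    let q := moveB p op
    q :: trailB q t

def part2_alt (instructions : String) : Int :=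
  let cs := instructions.toList
  let ev := (PySem.List.slice? cs (some 0) none 2).getD []   -- instructions[0::2]
  let od := (PySem.List.slice? cs (some 1) none 2).getD []   -- instructions[1::2]
  PySem.Set.len (PySem.Set.ofList ((0, 0) :: (trailB (0, 0) ev ++ trailB (0, 0) od)))

-- ===== PRECONDITION & SPEC =====
def Spec_part2 (instructions : String) (out : Int) : Prop := out = part2_alt instructions
instance (instructions : String) (out : Int) : Decidable (Spec_part2 instructions out) := by unfold Spec_part2; infer_instance

-- ===== CLAIM (what is proved, stated in full; the proofs are below) =====
def Claim_equal_part2 : Prop := ∀ (instructions : String), Dom_part2 instructions → Spec_part2 instructions (part2 instructions)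

-- ===== LEMMAS AND PROOFS =====

-- the even-index elements of a list (what xs[0::2] produces)
def evensL {α : Type} : List α → List α
  | [] => []
  | [x] => [x]
  | x :: _ :: t => x :: evensL t

-- the odd-index elements (xs[1::2])
def oddsL {α : Type} (xs : List α) : List α := evensL xs.tail

lemma evensL_cons {α : Type} (x : α) (t : List α) : evensL (x :: t) = x :: oddsL t := by
  cases t <;> rfl

-- xs[0::2] produces exactly the even-index elements
lemma ev_aux {α : Type} : ∀ (xs : List α),
    (List.range ((xs.length + 1) / 2)).filterMap (fun k => xs[2 * k]?) = evensL xs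
  | [] => by simp [evensL]
  | [x] => by simp [evensL, List.range_succ]
  | x :: y :: t => by
    have h : (t.length + 2 + 1) / 2 = (t.length + 1) / 2 + 1 := by omega
    rw [List.length_cons, List.length_cons, h, List.range_succ_eq_map,
      List.filterMap_cons, List.filterMap_map]
    have : ∀ k : Nat, (x :: y :: t)[2 * (k + 1)]? = t[2 * k]? := by
      intro k
      have : 2 * (k + 1) = 2 * k + 1 + 1 := by omega
      simp [this]
    simp only [Function.comp_def, Nat.succ_eq_add_one, this]
    simp [evensL, ev_aux t]

lemma slice?_zero_two {α : Type} (xs : List α) :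
    PySem.List.slice? xs (some 0) none 2 = some (evensL xs) := by
  rw [PySem.List.slice?]
  simp only [PySem.List.sliceIndices]
  norm_num
  have hc : (if 0 < xs.length then (((xs.length : Int) + 2 - 1) / 2).toNat else 0) = (xs.length + 1) / 2 := by
    split_ifs with h <;> omega
  have hidx : (fun (k : Nat) => xs[((2:Int) * k).toNat]?) = (fun k => xs[2 * k]?) := by
    funext k; congr 1
  rw [hc, hidx, ev_aux]

lemma slice?_one_two {α : Type} (xs : List α) :
    PySem.List.slice? xs (some 1) none 2 = some (oddsL xs) := by
  cases xs with
  | nil => rfl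
  | cons x t =>
    rw [PySem.List.slice?]
    simp only [PySem.List.sliceIndices]
    norm_num
    have hc : (if 0 < t.length then (((t.length : Int) + 2 - 1) / 2).toNat else 0) = (t.length + 1) / 2 := by
      split_ifs with h <;> omega
    have hidx : (fun (k : Nat) => (x :: t)[((1 : Int) + 2 * k).toNat]?) = (fun k => t[2 * k]?) := by
      funext k
      have h1 : ((1 : Int) + 2 * k).toNat = 2 * k + 1 := by omega
      rw [h1, List.getElem?_cons_succ]
    rw [hc, hidx, ev_aux]
    rfl

-- A's if/elif direction chain equals B's dict lookup with default (0, -1)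
lemma stepA_eq_moveB (p : Int × Int) (op : Char) : stepA p.1 p.2 op = moveB p op := by
  by_cases h1 : op = '>'
  · subst h1; rfl
  · by_cases h2 : op = '<'
    · subst h2; rfl
    · by_cases h3 : op = '^'
      · subst h3; rfl
      · have e1 : ('>' == op) = false := beq_eq_false_iff_ne.mpr (Ne.symm h1)
        have e2 : ('<' == op) = false := beq_eq_false_iff_ne.mpr (Ne.symm h2)
        have e3 : ('^' == op) = false := beq_eq_false_iff_ne.mpr (Ne.symm h3)
        simp [stepA, moveB, dirsB, PySem.Dict.getD, PySem.Dict.get?, PySem.Dict.insert,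
          PySem.Dict.empty, List.find?, e1, e2, e3, h1, h2, h3]

-- Loop invariant: A's interleaved fold visits exactly the two independent trails of B,
-- where m is the santa that moves next and w the waiting one.
lemma loop_inv (cs : List Char) : ∀ (s : Int) (m w : Int × Int) (sa : PySem.Set (Int × Int)),
    sa.Nodup →
    (∀ x, x ∈ ((PySem.List.enumerate cs s).foldl (fun st p => bodyA st p.1 p.2)
        ((if PySem.Int.mod s 2 = 0 then (m, w) else (w, m)), sa)).2 ↔
      (x ∈ sa ∨ x ∈ trailB m (evensL cs) ∨ x ∈ trailB w (oddsL cs))) ∧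
    ((PySem.List.enumerate cs s).foldl (fun st p => bodyA st p.1 p.2)
        ((if PySem.Int.mod s 2 = 0 then (m, w) else (w, m)), sa)).2.Nodup := by
  induction cs with
  | nil =>
    intro s m w sa hnd
    simp only [PySem.List.enumerate_nil, List.foldl_nil]
    refine ⟨fun x => ?_, hnd⟩
    simp [evensL, oddsL, trailB]
  | cons c t ih =>
    intro s m w sa hnd
    have hmod : PySem.Int.mod s 2 = s % 2 := PySem.Int.mod_eq_emod_of_pos (by norm_num)
    have hmod1 : PySem.Int.mod (s + 1) 2 = (s + 1) % 2 := PySem.Int.mod_eq_emod_of_pos (by norm_num)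
    rw [PySem.List.enumerate_cons]
    set p : Int × Int := moveB m c with hp
    have hstep : stepA m.1 m.2 c = p := stepA_eq_moveB m c
    have hmemE : ∀ x, x ∈ trailB m (evensL (c :: t)) ↔ x = p ∨ x ∈ trailB p (oddsL t) := by
      intro x; rw [evensL_cons]; simp [trailB, ← hp]
    have hoddsc : oddsL (c :: t) = evensL t := rfl
    by_cases hpar : PySem.Int.mod s 2 = 0
    · have hpar1 : ¬ PySem.Int.mod (s + 1) 2 = 0 := by rw [hmod1]; rw [hmod] at hpar; omega
      have hA : bodyA ((m, w), sa) s c = ((p, w), PySem.Set.add sa p) := by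
        simp only [bodyA, hpar, reduceIte, hstep]
      have := ih (s + 1) w p (PySem.Set.add sa p) (PySem.Set.nodup_add sa p hnd)
      rw [if_neg hpar1] at this
      simp only [List.foldl_cons, if_pos hpar, hA]
      refine ⟨fun x => ?_, this.2⟩
      rw [this.1 x, PySem.Set.mem_add, hmemE x, hoddsc]
      tauto
    · have hpar1 : PySem.Int.mod (s + 1) 2 = 0 := by rw [hmod1]; rw [hmod] at hpar; omega
      have hA : bodyA ((w, m), sa) s c = ((w, p), PySem.Set.add sa p) := by
        simp only [bodyA, if_neg hpar, hstep]
      have := ih (s + 1) w p (PySem.Set.add sa p) (PySem.Set.nodup_add sa p hnd)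
      rw [if_pos hpar1] at this
      simp only [List.foldl_cons, if_neg hpar, hA]
      refine ⟨fun x => ?_, this.2⟩
      rw [this.1 x, PySem.Set.mem_add, hmemE x, hoddsc]
      tauto

lemma length_eq_of_nodup_of_mem_iff {l m : List (Int × Int)} (h1 : l.Nodup) (h2 : m.Nodup)
    (h : ∀ x, x ∈ l ↔ x ∈ m) : l.length = m.length := by
  rw [← List.toFinset_card_of_nodup h1, ← List.toFinset_card_of_nodup h2]
  congr 1; ext x; simp [h x]

-- ===== VERDICT (by name: the statement is the Claim_ definition above) =====
theorem part2_spec : Claim_equal_part2 := by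
  intro instructions _
  unfold Spec_part2 part2 part2_alt
  set cs := instructions.toList with hcs
  have hfold :
      (PySem.List.pyRange 0 (PySem.List.len cs) 1).foldl
          (fun st i => bodyA st i (PySem.List.pyGetD cs i ' '))
          (((0, 0), (0, 0)), PySem.Set.ofList [(0, 0)]) =
        (PySem.List.enumerate cs 0).foldl (fun st p => bodyA st p.1 p.2)
          (((0, 0), (0, 0)), PySem.Set.ofList [(0, 0)]) := by
    rw [PySem.List.enumerate_eq_map_pyRange cs ' ', List.foldl_map]
  have hmain := loop_inv cs 0 (0, 0) (0, 0) (PySem.Set.ofList [(0, 0)]) (PySem.Set.nodup_ofList _)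
  rw [if_pos (by decide : PySem.Int.mod 0 2 = 0)] at hmain
  simp only [slice?_zero_two cs, slice?_one_two cs, Option.getD_some]
  have hmem : ∀ x, x ∈ ((PySem.List.enumerate cs 0).foldl (fun st p => bodyA st p.1 p.2)
        (((0, 0), (0, 0)), PySem.Set.ofList [(0, 0)])).2 ↔
      x ∈ PySem.Set.ofList ((0, 0) :: (trailB (0, 0) (evensL cs) ++ trailB (0, 0) (oddsL cs))) := by
    intro x
    rw [hmain.1 x, PySem.Set.mem_ofList]
    simp [PySem.Set.mem_ofList]
  have hlen := length_eq_of_nodup_of_mem_iff hmain.2 (PySem.Set.nodup_ofList _) hmem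
  simp only [hfold, PySem.Set.len, hlen]
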